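-- pv_equiv track=rewrite | github.com/Sety-project/pylibs | pfoptimizer/cta.py | extract_args_kwargs
-- ===== SOURCE A (Python) =====
-- def extract_args_kwargs(command,not_passed_token="not_passed"):
--     args = [arg.split('=')[0] for arg in command if len(arg.split('=')) == 1]
--     args = args[1:]
--     kwargs = dict()
--     for arg in command:
--         key_value = arg.split('=')
--         if len(key_value) == 2 and key_value[1] != not_passed_token:
--             kwargs |= {key_value[0]:key_value[1]}
--     return args,kwargs
-- ===== SOURCE B (Python) =====
-- def extract_args_kwargs(command, not_passed_token="not_passed"):
--     args = []
--     kwargs = {}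
--     skipped_first = False
--     for arg in command:
--         parts = arg.split('=')
--         if len(parts) == 1:
--             if skipped_first:
--                 args.append(parts[0])
--             else:
--                 skipped_first = True
--         elif len(parts) == 2 and parts[1] != not_passed_token:
--             kwargs[parts[0]] = parts[1]
--     return args, kwargs
-- ===== Notes on version B (the rewrite author's own statement) =====
-- stated objective: faster
-- what changed: Replaces A's two full passes (a filter/map comprehension plus slicing for args, then a second dict-merge loop for kwargs) with one fused loop that splits each token once and classifies it, skipping the first positional via a flag.
import Mathlib
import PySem

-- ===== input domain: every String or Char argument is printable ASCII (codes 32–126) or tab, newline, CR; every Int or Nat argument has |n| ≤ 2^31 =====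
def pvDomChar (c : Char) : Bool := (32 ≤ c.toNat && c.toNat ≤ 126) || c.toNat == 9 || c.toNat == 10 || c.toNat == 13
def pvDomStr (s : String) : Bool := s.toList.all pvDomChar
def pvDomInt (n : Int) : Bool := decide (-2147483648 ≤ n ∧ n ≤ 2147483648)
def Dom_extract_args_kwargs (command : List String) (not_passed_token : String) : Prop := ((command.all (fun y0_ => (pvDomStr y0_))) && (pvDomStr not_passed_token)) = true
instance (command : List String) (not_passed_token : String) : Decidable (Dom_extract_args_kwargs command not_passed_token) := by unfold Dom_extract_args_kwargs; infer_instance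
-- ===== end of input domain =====

-- B replaces A's two passes (comprehension + slice for args, second loop for kwargs) with one
-- fused loop classifying each token once, skipping the first positional via a flag (objective: simpler).

-- ===== PORT A =====
-- arg.split('=') ; '=' is a nonempty separator so split? is always some
def eakSplit (s : String) : List String := (PySem.Str.split? s "=").getD []

def extract_args_kwargs (command : List String) (not_passed_token : String) :
    List String × (List (String × String)) :=
  let args := (command.filter (fun arg => (eakSplit arg).length == 1)).map
      (fun arg => (eakSplit arg).headD "")
  let args := args.drop 1
  let kwargs := command.foldl (fun d arg =>
      let key_value := eakSplit arg
      if key_value.length == 2 && (key_value.getD 1 "") != not_passed_token then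
        d.insert (key_value.headD "") (key_value.getD 1 "")
      else d) (PySem.Dict.empty : PySem.Dict String String)
  (args, kwargs.items)

-- ===== PORT B =====
def eakStep (not_passed_token : String)
    (st : List String × PySem.Dict String String × Bool) (arg : String) :
    List String × PySem.Dict String String × Bool :=
  let parts := eakSplit arg
  if parts.length == 1 then
    if st.2.2 then (st.1 ++ [parts.headD ""], st.2.1, st.2.2)
    else (st.1, st.2.1, true)
  else if parts.length == 2 && (parts.getD 1 "") != not_passed_token then
    (st.1, st.2.1.insert (parts.headD "") (parts.getD 1 ""), st.2.2)
  else st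

def extract_args_kwargs_alt (command : List String) (not_passed_token : String) :
    List String × (List (String × String)) :=
  let st := command.foldl (eakStep not_passed_token)
      (([] : List String), (PySem.Dict.empty : PySem.Dict String String), false)
  (st.1, st.2.1.items)

-- ===== PRECONDITION & SPEC =====
def Spec_extract_args_kwargs (command : List String) (not_passed_token : String) (out : List String × (List (String × String))) : Prop := out = extract_args_kwargs_alt command not_passed_token
instance (command : List String) (not_passed_token : String) (out : List String × (List (String × String))) : Decidable (Spec_extract_args_kwargs command not_passed_token out) := by unfold Spec_extract_args_kwargs; infer_instance

-- ===== CLAIM (what is proved, stated in full; the proofs are below) =====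
def Claim_equal_extract_args_kwargs : Prop := ∀ (command : List String) (not_passed_token : String), Dom_extract_args_kwargs command not_passed_token → Spec_extract_args_kwargs command not_passed_token (extract_args_kwargs command not_passed_token)

-- ===== LEMMAS AND PROOFS =====

-- the positional tokens, in order (A's comprehension before the slice)
def eakPos (l : List String) : List String :=
  (l.filter (fun arg => (eakSplit arg).length == 1)).map (fun arg => (eakSplit arg).headD "")

-- A's kwargs fold
def eakKw (not_passed_token : String) (d : PySem.Dict String String) (l : List String) :
    PySem.Dict String String :=
  l.foldl (fun d arg =>
      let key_value := eakSplit arg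
      if key_value.length == 2 && (key_value.getD 1 "") != not_passed_token then
        d.insert (key_value.headD "") (key_value.getD 1 "")
      else d) d

theorem eak_loop_true (tok : String) (l : List String) (args : List String)
    (kw : PySem.Dict String String) :
    l.foldl (eakStep tok) (args, kw, true) = (args ++ eakPos l, eakKw tok kw l, true) := by
  induction l generalizing args kw with
  | nil => simp [eakPos, eakKw]
  | cons x xs ih =>
    cases h1 : ((eakSplit x).length == 1) with
    | true =>
      have hne : ¬((eakSplit x).length = 2 ∧ ¬(eakSplit x)[1]?.getD "" = tok) := by
        simp only [beq_iff_eq] at h1; omega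
      simp [eakStep, eakPos, eakKw, List.filter_cons, h1, hne, ih]
    | false =>
      have estep : eakStep tok (args, kw, true) x =
          (if ((eakSplit x).length == 2 && ((eakSplit x).getD 1 "") != tok) then
            (args, kw.insert ((eakSplit x).headD "") ((eakSplit x).getD 1 ""), true)
          else (args, kw, true)) := by
        simp [eakStep, h1]
      have ekw : eakKw tok kw (x :: xs) =
          eakKw tok (if ((eakSplit x).length == 2 && ((eakSplit x).getD 1 "") != tok) then
            kw.insert ((eakSplit x).headD "") ((eakSplit x).getD 1 "") else kw) xs := rfl
      have epos : eakPos (x :: xs) = eakPos xs := by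
        simp [eakPos, List.filter_cons, h1]
      rw [List.foldl_cons, estep, ekw, epos]
      cases h2 : ((eakSplit x).length == 2 && ((eakSplit x).getD 1 "") != tok) with
      | true => rw [if_pos rfl, if_pos rfl, ih]
      | false => rw [if_neg (by simp), if_neg (by simp), ih]

theorem eak_loop_false (tok : String) (l : List String) (args : List String)
    (kw : PySem.Dict String String) :
    (l.foldl (eakStep tok) (args, kw, false)).1 = args ++ (eakPos l).drop 1 ∧
    (l.foldl (eakStep tok) (args, kw, false)).2.1 = eakKw tok kw l := by
  induction l generalizing args kw with
  | nil => simp [eakPos, eakKw]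
  | cons x xs ih =>
    cases h1 : ((eakSplit x).length == 1) with
    | true =>
      have hne : ¬((eakSplit x).length = 2 ∧ ¬(eakSplit x)[1]?.getD "" = tok) := by
        simp only [beq_iff_eq] at h1; omega
      simp [eakStep, eakPos, eakKw, List.filter_cons, h1, hne, eak_loop_true]
    | false =>
      have estep : eakStep tok (args, kw, false) x =
          (if ((eakSplit x).length == 2 && ((eakSplit x).getD 1 "") != tok) then
            (args, kw.insert ((eakSplit x).headD "") ((eakSplit x).getD 1 ""), false)
          else (args, kw, false)) := by
        simp [eakStep, h1]
      have ekw : eakKw tok kw (x :: xs) =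
          eakKw tok (if ((eakSplit x).length == 2 && ((eakSplit x).getD 1 "") != tok) then
            kw.insert ((eakSplit x).headD "") ((eakSplit x).getD 1 "") else kw) xs := rfl
      have epos : eakPos (x :: xs) = eakPos xs := by
        simp [eakPos, List.filter_cons, h1]
      rw [List.foldl_cons, estep, ekw, epos]
      cases h2 : ((eakSplit x).length == 2 && ((eakSplit x).getD 1 "") != tok) with
      | true => rw [if_pos rfl, if_pos rfl]; exact ih _ _
      | false => rw [if_neg (by simp), if_neg (by simp)]; exact ih _ _

-- ===== VERDICT (by name: the statement is the Claim_ definition above) =====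
theorem extract_args_kwargs_spec : Claim_equal_extract_args_kwargs := by
  intro command tok _
  unfold Spec_extract_args_kwargs extract_args_kwargs extract_args_kwargs_alt
  have h := eak_loop_false tok command [] PySem.Dict.empty
  simp only [List.nil_append] at h
  simp only [h.1, h.2]
  rfl
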